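-- pv_equiv track=rewrite | github.com/fishy15/competitive_programming | online/andrew_stankevich/27/separable_divisions.py | verts
-- ===== SOURCE A (Python) =====
-- def verts(n, m):
--     ans = 0
--     for i in range(0, m):
--         for j in range(i, m):
--             for k in range(0, m):
--                 for l in range(k, m):
--                     if not (i == 0 or k == 0):
--                         continue
--                     if not (j == m-1 or l == m-1):
--                         continue
--
--                     x = max(i, k)
--                     y = min(j, l)
--                     len = y - x + 1
--                     if len >= 0:
--                         v = (n - 1) ** len
--                         if len == 0:
--                             ans += v
--                         else:
--                             ans += 2 * v
--     return ans
-- ===== SOURCE B (Python) =====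
-- def verts(n, m):
--     # Closed-form O(m): inclusion-exclusion over which endpoint is pinned gives
--     # ans = 2*(m-1) + 2*(n-1)^m + sum_{e=1}^{m} 8*(m-e)*(n-1)^e  for m >= 1, else 0.
--     if m <= 0:
--         return 0
--     total = 2 * (m - 1)
--     p = 1
--     for e in range(1, m + 1):
--         p *= (n - 1)
--         total += 8 * (m - e) * p
--     return total + 2 * p
-- ===== Notes on version B (the rewrite author's own statement) =====
-- stated objective: faster
-- what changed: Replaced the O(m^4) enumeration of index quadruples by a closed-form single pass: inclusion-exclusion over which endpoint is pinned reduces the sum to 2*(m-1) + 2*(n-1)^m + sum_{e=1}^{m} 8*(m-e)*(n-1)^e, accumulated in one O(m) loop.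
import Mathlib
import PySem

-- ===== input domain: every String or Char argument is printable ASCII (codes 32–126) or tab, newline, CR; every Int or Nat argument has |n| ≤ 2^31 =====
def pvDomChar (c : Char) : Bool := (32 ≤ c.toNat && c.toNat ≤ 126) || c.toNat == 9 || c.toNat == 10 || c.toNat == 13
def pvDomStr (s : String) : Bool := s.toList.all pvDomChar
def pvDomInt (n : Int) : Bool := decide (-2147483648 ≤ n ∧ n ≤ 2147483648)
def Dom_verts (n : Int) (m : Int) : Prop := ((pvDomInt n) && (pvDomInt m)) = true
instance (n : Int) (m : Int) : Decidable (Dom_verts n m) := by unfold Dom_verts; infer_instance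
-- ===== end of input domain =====

-- B replaces A's O(m^4) scan over index quadruples by a closed-form O(m) accumulation
-- derived by inclusion-exclusion over which endpoints are pinned (objective: faster).


-- ===== PORT A =====
-- literal port of Source A: four nested range loops with 'continue' guards;
-- '(n-1) ** len' is exact as '(n-1) ^ len.toNat' because it is guarded by 'len >= 0'
def verts (n : Int) (m : Int) : Int :=
  (PySem.List.pyRange 0 m 1).foldl (fun ans i =>
    (PySem.List.pyRange i m 1).foldl (fun ans j =>
      (PySem.List.pyRange 0 m 1).foldl (fun ans k =>
        (PySem.List.pyRange k m 1).foldl (fun ans l =>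
          if ¬(i = 0 ∨ k = 0) then ans
          else if ¬(j = m - 1 ∨ l = m - 1) then ans
          else
            let x := max i k
            let y := min j l
            let len := y - x + 1
            if len ≥ 0 then
              let v := (n - 1) ^ len.toNat
              if len = 0 then ans + v else ans + 2 * v
            else ans) ans) ans) ans) 0

-- ===== PORT B =====
-- literal port of Source B: one pass e = 1..m keeping (total, p) with p = (n-1)^e
def verts_alt (n : Int) (m : Int) : Int :=
  if m ≤ 0 then 0
  else
    let r := (PySem.List.pyRange 1 (m + 1) 1).foldl
      (fun (tp : Int × Int) e =>
        let p := tp.2 * (n - 1)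
        (tp.1 + 8 * (m - e) * p, p)) (2 * (m - 1), 1)
    r.1 + 2 * r.2

-- ===== PRECONDITION & SPEC =====
def Spec_verts (n : Int) (m : Int) (out : Int) : Prop := out = verts_alt n m
instance (n : Int) (m : Int) (out : Int) : Decidable (Spec_verts n m out) := by unfold Spec_verts; infer_instance

-- ===== CLAIM (what is proved, stated in full; the proofs are below) =====
def Claim_equal_verts : Prop := ∀ (n : Int) (m : Int), Dom_verts n m → Spec_verts n m (verts n m)

-- ===== LEMMAS AND PROOFS =====

def wfn (n L : Int) : Int := if 0 ≤ L then (if L = 0 then 1 else 2 * (n - 1) ^ L.toNat) else 0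
def termA (n m i j k l : Int) : Int :=
  if (i = 0 ∨ k = 0) ∧ (j = m - 1 ∨ l = m - 1) then wfn n (min j l - max i k + 1) else 0
def wwN (n : Int) (y x : Nat) : Int :=
  if y + 1 < x then 0 else if y + 1 = x then 1 else 2 * (n - 1) ^ (y + 1 - x)
def SNP (n : Int) (M : Nat) (P Q : Nat → Nat → Bool) : Int :=
  ∑ i ∈ Finset.range M, ∑ j ∈ Finset.range M,
    (if i ≤ j then
      ∑ k ∈ Finset.range M, ∑ l ∈ Finset.range M,
        (if k ≤ l then (if P i k && Q j l then wwN n (min j l) (max i k) else 0) else 0)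
    else 0)
def SN (n : Int) (M : Nat) : Int :=
  SNP n M (fun i k => i == 0 || k == 0) (fun j l => j == M - 1 || l == M - 1)

theorem pyRange_one_eq (a b : Int) :
    PySem.List.pyRange a b 1 = (List.range (b - a).toNat).map (fun t : Nat => a + (t : Int)) := by
  generalize hN : (b - a).toNat = N
  induction N generalizing a with
  | zero => simp [PySem.List.pyRange]; omega
  | succ N ih =>
    have hab : a < b := by omega
    rw [PySem.List.pyRange_one_cons hab, ih (a + 1) (by omega), List.range_succ_eq_map]
    rw [List.map_cons, List.map_map]
    refine congrArg₂ _ (by ring) ?_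
    apply List.map_congr_left; intro t _; simp [Function.comp]; ring

theorem wfn_cast (n : Int) (y x : Nat) : wfn n ((y : Int) - (x : Int) + 1) = wwN n y x := by
  unfold wfn wwN
  split_ifs <;> first
    | rfl
    | omega
    | (have h : ((y:Int) - (x:Int) + 1).toNat = y + 1 - x := by omega
       rw [h])

theorem sum_map_range (M : Nat) (g : Nat → Int) :
    ((List.range M).map g).sum = ∑ x ∈ Finset.range M, g x := rfl

theorem filter_le_range (i M : Nat) (_h : i < M) :
    (Finset.range M).filter (fun j => i ≤ j) = Finset.Ico i M := by
  ext x; simp [Finset.mem_Ico]; omega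

theorem shift_sum (M i : Nat) (hi : i < M) (f : Nat → Int) :
    ∑ t ∈ Finset.range (M - i), f (i + t) = ∑ j ∈ Finset.range M, if i ≤ j then f j else 0 := by
  rw [← Finset.sum_Ico_eq_sum_range, ← filter_le_range i M hi, Finset.sum_filter]

theorem termA_cast (n : Int) (M : Nat) (hM : 0 < M) (i j k l : Nat) :
    termA n (M : Int) i j k l
      = (if (i == 0 || k == 0) && (j == M - 1 || l == M - 1)
          then wwN n (min j l) (max i k) else 0) := by
  unfold termA
  have hc : (((i:Int) = 0 ∨ (k:Int) = 0) ∧ ((j:Int) = (M:Int) - 1 ∨ (l:Int) = (M:Int) - 1)) ↔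
      (((i == 0 || k == 0) && (j == M - 1 || l == M - 1)) = true) := by
    simp only [Bool.and_eq_true, Bool.or_eq_true, beq_iff_eq]
    omega
  have h3 : min (j:Int) (l:Int) - max (i:Int) (k:Int) + 1
      = ((min j l : Nat) : Int) - ((max i k : Nat) : Int) + 1 := by push_cast; ring
  rw [if_congr hc (by rw [h3, wfn_cast]) rfl]

theorem listsum_eq_SN (n m : Int) (h : 0 < m) :
    ((PySem.List.pyRange 0 m 1).map (fun i =>
      ((PySem.List.pyRange i m 1).map (fun j =>
        ((PySem.List.pyRange 0 m 1).map (fun k =>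
          ((PySem.List.pyRange k m 1).map (fun l => termA n m i j k l)).sum)).sum)).sum)).sum
    = SN n m.toNat := by
  obtain ⟨M, rfl⟩ : ∃ M : Nat, m = ↑M := ⟨m.toNat, by omega⟩
  have hM : 0 < M := by exact_mod_cast h
  simp only [pyRange_one_eq, List.map_map, sub_zero, Int.toNat_natCast, zero_add]
  simp only [Function.comp, sum_map_range]
  rw [SN, SNP]
  refine Finset.sum_congr rfl (fun i hi => ?_)
  have hiM : i < M := Finset.mem_range.mp hi
  have hsub : ((M:Int) - (i:Int)).toNat = M - i := Int.toNat_sub M i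
  rw [hsub]
  simp only [← Nat.cast_add, Int.toNat_sub]
  rw [shift_sum M i hiM (fun j => ∑ k ∈ Finset.range M,
    ∑ t ∈ Finset.range (M - k), termA n (M:Int) (i:Int) (j:Int) (k:Int) ((k + t : Nat) : Int))]
  refine Finset.sum_congr rfl (fun j hj => ?_)
  by_cases hij : i ≤ j
  · simp only [if_pos hij]
    refine Finset.sum_congr rfl (fun k hk => ?_)
    have hkM : k < M := Finset.mem_range.mp hk
    rw [shift_sum M k hkM (fun l => termA n (M:Int) (i:Int) (j:Int) (k:Int) (l:Int))]
    refine Finset.sum_congr rfl (fun l hl => ?_)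
    by_cases hkl : k ≤ l
    · simp only [if_pos hkl]
      exact termA_cast n M hM i j k l
    · simp only [if_neg hkl]
  · simp only [if_neg hij]

def pL (i _k : Nat) : Bool := i == 0
def pR (_i k : Nat) : Bool := k == 0
def pB (i k : Nat) : Bool := i == 0 && k == 0
def qLf (M : Nat) (j _l : Nat) : Bool := j == M - 1
def qRf (M : Nat) (_j l : Nat) : Bool := l == M - 1
def qBf (M : Nat) (j l : Nat) : Bool := j == M - 1 && l == M - 1

def inner2 (n : Int) (M : Nat) (P Q : Nat → Nat → Bool) (i j : Nat) : Int :=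
  ∑ k ∈ Finset.range M, ∑ l ∈ Finset.range M,
    (if k ≤ l then (if P i k && Q j l then wwN n (min j l) (max i k) else 0) else 0)

theorem SNP_eq_inner2 (n : Int) (M : Nat) (P Q : Nat → Nat → Bool) :
    SNP n M P Q = ∑ i ∈ Finset.range M, ∑ j ∈ Finset.range M,
      (if i ≤ j then inner2 n M P Q i j else 0) := rfl

theorem SN_expand (n : Int) (M : Nat) :
    SN n M =
      SNP n M pL (qLf M) + SNP n M pL (qRf M) + SNP n M pR (qLf M) + SNP n M pR (qRf M)
      - SNP n M pL (qBf M) - SNP n M pR (qBf M) - SNP n M pB (qLf M) - SNP n M pB (qRf M)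
      + SNP n M pB (qBf M) := by
  have key : ∀ i j k l : Nat,
      (if k ≤ l then (if (i == 0 || k == 0) && (j == M - 1 || l == M - 1)
          then wwN n (min j l) (max i k) else 0) else 0)
      = (if k ≤ l then (if pL i k && qLf M j l then wwN n (min j l) (max i k) else 0) else 0)
      + (if k ≤ l then (if pL i k && qRf M j l then wwN n (min j l) (max i k) else 0) else 0)
      + (if k ≤ l then (if pR i k && qLf M j l then wwN n (min j l) (max i k) else 0) else 0)
      + (if k ≤ l then (if pR i k && qRf M j l then wwN n (min j l) (max i k) else 0) else 0)
      - (if k ≤ l then (if pL i k && qBf M j l then wwN n (min j l) (max i k) else 0) else 0)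
      - (if k ≤ l then (if pR i k && qBf M j l then wwN n (min j l) (max i k) else 0) else 0)
      - (if k ≤ l then (if pB i k && qLf M j l then wwN n (min j l) (max i k) else 0) else 0)
      - (if k ≤ l then (if pB i k && qRf M j l then wwN n (min j l) (max i k) else 0) else 0)
      + (if k ≤ l then (if pB i k && qBf M j l then wwN n (min j l) (max i k) else 0) else 0) := by
    intro i j k l
    unfold pL pR pB qLf qRf qBf
    by_cases h1 : i = 0 <;> by_cases h2 : k = 0 <;> by_cases h3 : j = M - 1 <;> by_cases h4 : l = M - 1 <;>
      simp [beq_iff_eq, h1, h2, h3, h4] <;> split_ifs <;> ring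
  have hinner : ∀ i j : Nat,
      inner2 n M (fun i k => i == 0 || k == 0) (fun j l => j == M - 1 || l == M - 1) i j
      = inner2 n M pL (qLf M) i j + inner2 n M pL (qRf M) i j
        + inner2 n M pR (qLf M) i j + inner2 n M pR (qRf M) i j
        - inner2 n M pL (qBf M) i j - inner2 n M pR (qBf M) i j
        - inner2 n M pB (qLf M) i j - inner2 n M pB (qRf M) i j
        + inner2 n M pB (qBf M) i j := by
    intro i j
    unfold inner2
    calc ∑ k ∈ Finset.range M, ∑ l ∈ Finset.range M,
        (if k ≤ l then (if (i == 0 || k == 0) && (j == M - 1 || l == M - 1)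
            then wwN n (min j l) (max i k) else 0) else 0)
        = ∑ k ∈ Finset.range M, ∑ l ∈ Finset.range M,
          ((if k ≤ l then (if pL i k && qLf M j l then wwN n (min j l) (max i k) else 0) else 0)
          + (if k ≤ l then (if pL i k && qRf M j l then wwN n (min j l) (max i k) else 0) else 0)
          + (if k ≤ l then (if pR i k && qLf M j l then wwN n (min j l) (max i k) else 0) else 0)
          + (if k ≤ l then (if pR i k && qRf M j l then wwN n (min j l) (max i k) else 0) else 0)
          - (if k ≤ l then (if pL i k && qBf M j l then wwN n (min j l) (max i k) else 0) else 0)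
          - (if k ≤ l then (if pR i k && qBf M j l then wwN n (min j l) (max i k) else 0) else 0)
          - (if k ≤ l then (if pB i k && qLf M j l then wwN n (min j l) (max i k) else 0) else 0)
          - (if k ≤ l then (if pB i k && qRf M j l then wwN n (min j l) (max i k) else 0) else 0)
          + (if k ≤ l then (if pB i k && qBf M j l then wwN n (min j l) (max i k) else 0) else 0)) := by
          exact Finset.sum_congr rfl (fun k _ => Finset.sum_congr rfl (fun l _ => key i j k l))
      _ = _ := by simp only [Finset.sum_add_distrib, Finset.sum_sub_distrib]
  have hsplit : ∀ i j : Nat,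
      (if i ≤ j then inner2 n M (fun i k => i == 0 || k == 0) (fun j l => j == M - 1 || l == M - 1) i j else 0)
      = (if i ≤ j then inner2 n M pL (qLf M) i j else 0)
        + (if i ≤ j then inner2 n M pL (qRf M) i j else 0)
        + (if i ≤ j then inner2 n M pR (qLf M) i j else 0)
        + (if i ≤ j then inner2 n M pR (qRf M) i j else 0)
        - (if i ≤ j then inner2 n M pL (qBf M) i j else 0)
        - (if i ≤ j then inner2 n M pR (qBf M) i j else 0)
        - (if i ≤ j then inner2 n M pB (qLf M) i j else 0)
        - (if i ≤ j then inner2 n M pB (qRf M) i j else 0)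
        + (if i ≤ j then inner2 n M pB (qBf M) i j else 0) := by
    intro i j
    rw [hinner i j]
    split_ifs with h
    · rfl
    · ring
  rw [SN, SNP_eq_inner2]
  rw [Finset.sum_congr rfl (fun i _ => Finset.sum_congr rfl (fun j _ => hsplit i j))]
  simp only [Finset.sum_add_distrib, Finset.sum_sub_distrib]
  simp only [← SNP_eq_inner2]

def Usum (n : Int) (M : Nat) : Int :=
  ∑ k ∈ Finset.range M, ∑ l ∈ Finset.range M, (if k ≤ l then wwN n l k else 0)
def Vsum (n : Int) (M : Nat) : Int :=
  ∑ j ∈ Finset.range M, ∑ k ∈ Finset.range M, wwN n j k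
def Wsum (n : Int) (M : Nat) : Int := ∑ l ∈ Finset.range M, wwN n l 0
def W2sum (n : Int) (M : Nat) : Int := ∑ k ∈ Finset.range M, wwN n (M - 1) k

theorem SNP_LL (n : Int) (M : Nat) (hM : 0 < M) : SNP n M pL (qLf M) = Usum n M := by
  rw [SNP_eq_inner2]
  refine Eq.trans (Finset.sum_eq_single_of_mem 0 (Finset.mem_range.mpr hM) ?_) ?_
  · intro i _ hi
    simp [inner2, pL, hi]
  · simp only [Nat.zero_le, if_true]
    refine Eq.trans (Finset.sum_eq_single_of_mem (M - 1) (Finset.mem_range.mpr (by omega)) ?_) ?_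
    · intro j _ hj
      simp [inner2, qLf, hj]
    · simp only [inner2, pL, qLf, BEq.rfl, Bool.and_self, if_true]
      refine Finset.sum_congr rfl (fun k hk => Finset.sum_congr rfl (fun l hl => ?_))
      have hlM : l < M := Finset.mem_range.mp hl
      by_cases hkl : k ≤ l
      · simp only [if_pos hkl]
        rw [Nat.min_eq_right (by omega), Nat.max_eq_right (Nat.zero_le k)]
      · simp only [if_neg hkl]

theorem SNP_LR (n : Int) (M : Nat) (hM : 0 < M) : SNP n M pL (qRf M) = Vsum n M := by
  rw [SNP_eq_inner2]
  refine Eq.trans (Finset.sum_eq_single_of_mem 0 (Finset.mem_range.mpr hM) ?_) ?_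
  · intro i _ hi; simp [inner2, pL, hi]
  · simp only [Nat.zero_le, if_true]
    refine Finset.sum_congr rfl (fun j hj => ?_)
    have hjM : j < M := Finset.mem_range.mp hj
    rw [inner2]
    refine Finset.sum_congr rfl (fun k hk => ?_)
    have hkM : k < M := Finset.mem_range.mp hk
    refine Eq.trans (Finset.sum_eq_single_of_mem (M - 1) (Finset.mem_range.mpr (by omega)) ?_) ?_
    · intro l _ hl; simp [pL, qRf, hl]
    · simp only [pL, qRf, BEq.rfl, Bool.and_self, if_pos (show k ≤ M - 1 by omega)]
      rw [Nat.min_eq_left (by omega), Nat.max_eq_right (Nat.zero_le k)]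
      simp

theorem SNP_RL (n : Int) (M : Nat) (hM : 0 < M) : SNP n M pR (qLf M) = Vsum n M := by
  rw [SNP_eq_inner2]
  have hcol : ∀ i ∈ Finset.range M,
      (∑ j ∈ Finset.range M, if i ≤ j then inner2 n M pR (qLf M) i j else 0)
      = inner2 n M pR (qLf M) i (M - 1) := by
    intro i hi
    have hiM : i < M := Finset.mem_range.mp hi
    refine Eq.trans (Finset.sum_eq_single_of_mem (M - 1) (Finset.mem_range.mpr (by omega)) ?_) ?_
    · intro j _ hj; simp [inner2, qLf, hj]
    · rw [if_pos (by omega)]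
  rw [Finset.sum_congr rfl hcol]
  have hval : ∀ i ∈ Finset.range M, inner2 n M pR (qLf M) i (M - 1) = ∑ l ∈ Finset.range M, wwN n l i := by
    intro i hi
    have hiM : i < M := Finset.mem_range.mp hi
    rw [inner2]
    refine Eq.trans (Finset.sum_eq_single_of_mem 0 (Finset.mem_range.mpr hM) ?_) ?_
    · intro k _ hk; simp [pR, hk]
    · simp only [pR, qLf, BEq.rfl, Bool.and_self, Nat.zero_le, if_true]
      refine Finset.sum_congr rfl (fun l hl => ?_)
      have hlM : l < M := Finset.mem_range.mp hl
      rw [Nat.min_eq_right (by omega), Nat.max_eq_left (Nat.zero_le i)]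
  rw [Finset.sum_congr rfl hval, Finset.sum_comm]
  rfl

theorem SNP_RR (n : Int) (M : Nat) (hM : 0 < M) : SNP n M pR (qRf M) = Usum n M := by
  rw [SNP_eq_inner2]
  refine Finset.sum_congr rfl (fun i hi => ?_)
  have hiM : i < M := Finset.mem_range.mp hi
  refine Finset.sum_congr rfl (fun j hj => ?_)
  have hjM : j < M := Finset.mem_range.mp hj
  by_cases hij : i ≤ j
  · simp only [if_pos hij]
    rw [inner2]
    refine Eq.trans (Finset.sum_eq_single_of_mem 0 (Finset.mem_range.mpr hM) ?_) ?_
    · intro k _ hk; simp [pR, hk]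
    · refine Eq.trans (Finset.sum_eq_single_of_mem (M - 1) (Finset.mem_range.mpr (by omega)) ?_) ?_
      · intro l _ hl; simp [qRf, hl]
      · simp only [pR, qRf, BEq.rfl, Bool.and_self, Nat.zero_le, if_true]
        rw [Nat.min_eq_left (by omega), Nat.max_eq_left (Nat.zero_le i)]
  · simp only [if_neg hij]

theorem SNP_LB (n : Int) (M : Nat) (hM : 0 < M) : SNP n M pL (qBf M) = W2sum n M := by
  rw [SNP_eq_inner2]
  refine Eq.trans (Finset.sum_eq_single_of_mem 0 (Finset.mem_range.mpr hM) ?_) ?_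
  · intro i _ hi; simp [inner2, pL, hi]
  · simp only [Nat.zero_le, if_true]
    refine Eq.trans (Finset.sum_eq_single_of_mem (M - 1) (Finset.mem_range.mpr (by omega)) ?_) ?_
    · intro j _ hj; simp [inner2, qBf, hj]
    · rw [inner2]
      refine Finset.sum_congr rfl (fun k hk => ?_)
      have hkM : k < M := Finset.mem_range.mp hk
      refine Eq.trans (Finset.sum_eq_single_of_mem (M - 1) (Finset.mem_range.mpr (by omega)) ?_) ?_
      · intro l _ hl; simp [pL, qBf, hl]
      · simp only [pL, qBf, BEq.rfl, Bool.and_self, if_pos (show k ≤ M - 1 by omega)]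
        rw [Nat.min_self, Nat.max_eq_right (Nat.zero_le k)]
        simp

theorem SNP_RB (n : Int) (M : Nat) (hM : 0 < M) : SNP n M pR (qBf M) = W2sum n M := by
  rw [SNP_eq_inner2]
  have hcol : ∀ i ∈ Finset.range M,
      (∑ j ∈ Finset.range M, if i ≤ j then inner2 n M pR (qBf M) i j else 0)
      = inner2 n M pR (qBf M) i (M - 1) := by
    intro i hi
    have hiM : i < M := Finset.mem_range.mp hi
    refine Eq.trans (Finset.sum_eq_single_of_mem (M - 1) (Finset.mem_range.mpr (by omega)) ?_) ?_
    · intro j _ hj; simp [inner2, qBf, hj]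
    · rw [if_pos (by omega)]
  rw [Finset.sum_congr rfl hcol]
  refine Finset.sum_congr rfl (fun i hi => ?_)
  have hiM : i < M := Finset.mem_range.mp hi
  rw [inner2]
  refine Eq.trans (Finset.sum_eq_single_of_mem 0 (Finset.mem_range.mpr hM) ?_) ?_
  · intro k _ hk; simp [pR, hk]
  · refine Eq.trans (Finset.sum_eq_single_of_mem (M - 1) (Finset.mem_range.mpr (by omega)) ?_) ?_
    · intro l _ hl; simp [qBf, hl]
    · simp only [pR, qBf, BEq.rfl, Bool.and_self, Nat.zero_le, if_true]
      rw [Nat.min_self, Nat.max_eq_left (Nat.zero_le i)]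

theorem SNP_BL (n : Int) (M : Nat) (hM : 0 < M) : SNP n M pB (qLf M) = Wsum n M := by
  rw [SNP_eq_inner2]
  refine Eq.trans (Finset.sum_eq_single_of_mem 0 (Finset.mem_range.mpr hM) ?_) ?_
  · intro i _ hi; simp [inner2, pB, hi]
  · simp only [Nat.zero_le, if_true]
    refine Eq.trans (Finset.sum_eq_single_of_mem (M - 1) (Finset.mem_range.mpr (by omega)) ?_) ?_
    · intro j _ hj; simp [inner2, qLf, hj]
    · rw [inner2]
      refine Eq.trans (Finset.sum_eq_single_of_mem 0 (Finset.mem_range.mpr hM) ?_) ?_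
      · intro k _ hk; simp [pB, hk]
      · simp only [pB, qLf, BEq.rfl, Bool.and_self, Nat.zero_le, if_true]
        refine Finset.sum_congr rfl (fun l hl => ?_)
        have hlM : l < M := Finset.mem_range.mp hl
        rw [Nat.min_eq_right (by omega), Nat.max_self]

theorem SNP_BR (n : Int) (M : Nat) (hM : 0 < M) : SNP n M pB (qRf M) = Wsum n M := by
  rw [SNP_eq_inner2]
  refine Eq.trans (Finset.sum_eq_single_of_mem 0 (Finset.mem_range.mpr hM) ?_) ?_
  · intro i _ hi; simp [inner2, pB, hi]
  · simp only [Nat.zero_le, if_true]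
    refine Finset.sum_congr rfl (fun j hj => ?_)
    have hjM : j < M := Finset.mem_range.mp hj
    rw [inner2]
    refine Eq.trans (Finset.sum_eq_single_of_mem 0 (Finset.mem_range.mpr hM) ?_) ?_
    · intro k _ hk; simp [pB, hk]
    · refine Eq.trans (Finset.sum_eq_single_of_mem (M - 1) (Finset.mem_range.mpr (by omega)) ?_) ?_
      · intro l _ hl; simp [qRf, hl]
      · simp only [pB, qRf, BEq.rfl, Bool.and_self, Nat.zero_le, if_true]
        rw [Nat.min_eq_left (by omega), Nat.max_self]

theorem SNP_BB (n : Int) (M : Nat) (hM : 0 < M) : SNP n M pB (qBf M) = wwN n (M - 1) 0 := by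
  rw [SNP_eq_inner2]
  refine Eq.trans (Finset.sum_eq_single_of_mem 0 (Finset.mem_range.mpr hM) ?_) ?_
  · intro i _ hi; simp [inner2, pB, hi]
  · simp only [Nat.zero_le, if_true]
    refine Eq.trans (Finset.sum_eq_single_of_mem (M - 1) (Finset.mem_range.mpr (by omega)) ?_) ?_
    · intro j _ hj; simp [inner2, qBf, hj]
    · rw [inner2]
      refine Eq.trans (Finset.sum_eq_single_of_mem 0 (Finset.mem_range.mpr hM) ?_) ?_
      · intro k _ hk; simp [pB, hk]
      · refine Eq.trans (Finset.sum_eq_single_of_mem (M - 1) (Finset.mem_range.mpr (by omega)) ?_) ?_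
        · intro l _ hl; simp [pB, qBf, hl]
        · simp only [pB, qBf, BEq.rfl, Bool.and_self, Nat.zero_le, if_true]
          rw [Nat.min_self, Nat.max_self]

theorem verts_eq_listsum (n m : Int) :
    verts n m = ((PySem.List.pyRange 0 m 1).map (fun i =>
      ((PySem.List.pyRange i m 1).map (fun j =>
        ((PySem.List.pyRange 0 m 1).map (fun k =>
          ((PySem.List.pyRange k m 1).map (fun l => termA n m i j k l)).sum)).sum)).sum)).sum := by
  unfold verts
  have h4 : ∀ (i j k : Int) (ans : Int) (lst : List Int),
      lst.foldl (fun ans l =>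
          if ¬(i = 0 ∨ k = 0) then ans
          else if ¬(j = m - 1 ∨ l = m - 1) then ans
          else
            let x := max i k
            let y := min j l
            let len := y - x + 1
            if len ≥ 0 then
              let v := (n - 1) ^ len.toNat
              if len = 0 then ans + v else ans + 2 * v
            else ans) ans
      = ans + (lst.map (fun l => termA n m i j k l)).sum := by
    intro i j k ans lst
    refine (PySem.List.foldl_congr_mem lst _ (fun acc l => acc + termA n m i j k l) ans ?_).trans
      (PySem.List.foldl_add lst _ ans)
    intro acc lv _
    dsimp only
    simp only [termA, wfn]
    split_ifs <;> simp_all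
  have h3 : ∀ (i j : Int) (ans : Int),
      (PySem.List.pyRange 0 m 1).foldl (fun ans k =>
        (PySem.List.pyRange k m 1).foldl (fun ans l =>
          if ¬(i = 0 ∨ k = 0) then ans
          else if ¬(j = m - 1 ∨ l = m - 1) then ans
          else
            let x := max i k
            let y := min j l
            let len := y - x + 1
            if len ≥ 0 then
              let v := (n - 1) ^ len.toNat
              if len = 0 then ans + v else ans + 2 * v
            else ans) ans) ans
      = ans + ((PySem.List.pyRange 0 m 1).map (fun k =>
          ((PySem.List.pyRange k m 1).map (fun l => termA n m i j k l)).sum)).sum := by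
    intro i j ans
    refine (PySem.List.foldl_congr_mem (PySem.List.pyRange 0 m 1) _
      (fun acc k => acc + ((PySem.List.pyRange k m 1).map (fun l => termA n m i j k l)).sum) ans
      (fun acc k _ => h4 i j k acc _)).trans
      (PySem.List.foldl_add _ _ ans)
  have h2 : ∀ (i : Int) (ans : Int),
      (PySem.List.pyRange i m 1).foldl (fun ans j =>
        (PySem.List.pyRange 0 m 1).foldl (fun ans k =>
          (PySem.List.pyRange k m 1).foldl (fun ans l =>
            if ¬(i = 0 ∨ k = 0) then ans
            else if ¬(j = m - 1 ∨ l = m - 1) then ans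
            else
              let x := max i k
              let y := min j l
              let len := y - x + 1
              if len ≥ 0 then
                let v := (n - 1) ^ len.toNat
                if len = 0 then ans + v else ans + 2 * v
              else ans) ans) ans) ans
      = ans + ((PySem.List.pyRange i m 1).map (fun j =>
          ((PySem.List.pyRange 0 m 1).map (fun k =>
            ((PySem.List.pyRange k m 1).map (fun l => termA n m i j k l)).sum)).sum)).sum := by
    intro i ans
    refine (PySem.List.foldl_congr_mem (PySem.List.pyRange i m 1) _
      (fun acc j => acc + ((PySem.List.pyRange 0 m 1).map (fun k =>
        ((PySem.List.pyRange k m 1).map (fun l => termA n m i j k l)).sum)).sum) ans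
      (fun acc j _ => h3 i j acc)).trans
      (PySem.List.foldl_add _ _ ans)
  rw [PySem.List.foldl_congr_mem (PySem.List.pyRange 0 m 1) _
    (fun acc i => acc + ((PySem.List.pyRange i m 1).map (fun j =>
      ((PySem.List.pyRange 0 m 1).map (fun k =>
        ((PySem.List.pyRange k m 1).map (fun l => termA n m i j k l)).sum)).sum)).sum) 0
    (fun acc i _ => h2 i acc)]
  rw [PySem.List.foldl_add]
  simp

theorem wwN_of_le (n : Int) {y x : Nat} (h : x ≤ y + 1) (h2 : x ≠ y + 1) :
    wwN n y x = 2 * (n - 1) ^ (y + 1 - x) := by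
  unfold wwN; rw [if_neg (by omega), if_neg (by omega)]

theorem wwN_zero (n : Int) (l : Nat) : wwN n l 0 = 2 * (n - 1) ^ (l + 1) := by
  rw [wwN_of_le n (by omega) (by omega)]; norm_num

theorem W_closed (n : Int) (M : Nat) :
    Wsum n M = ∑ d ∈ Finset.range M, 2 * (n - 1) ^ (d + 1) := by
  unfold Wsum; exact Finset.sum_congr rfl (fun d _ => wwN_zero n d)

theorem W2_eq_W (n : Int) (M : Nat) : W2sum n M = Wsum n M := by
  unfold W2sum Wsum
  rw [← Finset.sum_range_reflect]
  refine Finset.sum_congr rfl (fun k hk => ?_)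
  have hkM : k < M := Finset.mem_range.mp hk
  rw [wwN_zero, wwN_of_le n (by omega) (by omega)]
  have he : M - 1 + 1 - (M - 1 - k) = k + 1 := by omega
  rw [he]

theorem tri_sum (f : Nat → Int) (M : Nat) :
    ∑ l ∈ Finset.range M, ∑ d ∈ Finset.range (l + 1), f d
      = ∑ d ∈ Finset.range M, ((M - d : Nat) : Int) * f d := by
  induction M with
  | zero => simp
  | succ M ih =>
    rw [Finset.sum_range_succ, ih, Finset.sum_range_succ, Finset.sum_range_succ]
    have h : ∀ d ∈ Finset.range M, ((M + 1 - d : Nat) : Int) * f d = ((M - d : Nat) : Int) * f d + f d := by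
      intro d hd
      have : d < M := Finset.mem_range.mp hd
      have h1 : ((M + 1 - d : Nat) : Int) = ((M - d : Nat) : Int) + 1 := by omega
      rw [h1]; ring
    rw [Finset.sum_congr rfl h, Finset.sum_add_distrib]
    simp
    ring

theorem filter_le_range' (l M : Nat) (h : l < M) :
    (Finset.range M).filter (fun k => k ≤ l) = Finset.range (l + 1) := by
  ext x; simp; omega

theorem U_closed (n : Int) (M : Nat) :
    Usum n M = ∑ d ∈ Finset.range M, ((M - d : Nat) : Int) * (2 * (n - 1) ^ (d + 1)) := by
  unfold Usum
  rw [Finset.sum_comm]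
  rw [← tri_sum]
  refine Finset.sum_congr rfl (fun l hl => ?_)
  have hlM : l < M := Finset.mem_range.mp hl
  rw [← Finset.sum_filter, filter_le_range' l M hlM, ← Finset.sum_range_reflect]
  refine Finset.sum_congr rfl (fun d hd => ?_)
  have : d < l + 1 := Finset.mem_range.mp hd
  rw [wwN_of_le n (by omega) (by omega)]
  have he : l + 1 - (l + 1 - 1 - d) = d + 1 := by omega
  rw [he]

theorem V_eq_U_add (n : Int) (M : Nat) (h : 0 < M) :
    Vsum n M = Usum n M + ((M : Int) - 1) := by
  unfold Vsum Usum
  have hsplit : ∀ j ∈ Finset.range M, ∀ k ∈ Finset.range M,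
      wwN n j k = (if k ≤ j then wwN n j k else 0) + (if k = j + 1 then 1 else 0) := by
    intro j _ k _
    unfold wwN
    split_ifs <;> omega
  calc ∑ j ∈ Finset.range M, ∑ k ∈ Finset.range M, wwN n j k
      = ∑ j ∈ Finset.range M, ∑ k ∈ Finset.range M,
          ((if k ≤ j then wwN n j k else 0) + (if k = j + 1 then 1 else 0)) := by
        refine Finset.sum_congr rfl (fun j hj => Finset.sum_congr rfl (fun k hk => hsplit j hj k hk))
    _ = (∑ j ∈ Finset.range M, ∑ k ∈ Finset.range M, (if k ≤ j then wwN n j k else 0))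
        + ∑ j ∈ Finset.range M, ∑ k ∈ Finset.range M, (if k = j + 1 then (1:Int) else 0) := by
        rw [← Finset.sum_add_distrib]
        exact Finset.sum_congr rfl (fun j _ => Finset.sum_add_distrib)
    _ = _ := by
        congr 1
        · rw [Finset.sum_comm]
        · have : ∀ j ∈ Finset.range M, (∑ k ∈ Finset.range M, if k = j + 1 then (1:Int) else 0)
              = if j + 1 ∈ Finset.range M then 1 else 0 := by
            intro j _; exact Finset.sum_ite_eq' (Finset.range M) (j+1) (fun _ => 1)
          rw [Finset.sum_congr rfl this]
          simp only [Finset.mem_range]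
          have : ∀ j ∈ Finset.range M, (if j + 1 < M then (1:Int) else 0) = if j < M - 1 then 1 else 0 := by
            intro j _; split_ifs <;> omega
          rw [Finset.sum_congr rfl this, ← Finset.sum_filter]
          have : (Finset.range M).filter (fun j => j < M - 1) = Finset.range (M - 1) := by
            ext x; simp; omega
          rw [this]
          simp
          omega

theorem foldB (n m : Int) (N : Nat) (a p0 : Int) :
    (List.range N).foldl
      (fun (tp : Int × Int) (d : Nat) => (tp.1 + 8 * (m - (1 + (d : Int))) * (tp.2 * (n - 1)), tp.2 * (n - 1)))
      (a, p0)
    = (a + ∑ d ∈ Finset.range N, 8 * (m - (1 + (d : Int))) * (p0 * (n - 1) ^ (d + 1)),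
       p0 * (n - 1) ^ N) := by
  induction N with
  | zero => simp
  | succ N ih =>
    rw [List.range_succ, List.foldl_append, ih, Finset.sum_range_succ]
    simp
    constructor <;> ring

theorem verts_alt_closed (n m : Int) (h : 0 < m) :
    verts_alt n m = 2 * (m - 1)
      + ∑ d ∈ Finset.range m.toNat, 8 * (m - (1 + (d : Int))) * (n - 1) ^ (d + 1)
      + 2 * (n - 1) ^ m.toNat := by
  unfold verts_alt
  rw [if_neg (by omega)]
  rw [pyRange_one_eq]
  have he : (m + 1 - 1).toNat = m.toNat := by omega
  rw [he, List.foldl_map]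
  have hb := foldB n m m.toNat (2 * (m - 1)) 1
  show ((List.range m.toNat).foldl
      (fun (tp : Int × Int) (t : Nat) => (tp.1 + 8 * (m - (1 + (t : Int))) * (tp.2 * (n - 1)), tp.2 * (n - 1)))
      (2 * (m - 1), 1)).1 + 2 * ((List.range m.toNat).foldl
      (fun (tp : Int × Int) (t : Nat) => (tp.1 + 8 * (m - (1 + (t : Int))) * (tp.2 * (n - 1)), tp.2 * (n - 1)))
      (2 * (m - 1), 1)).2 = _
  rw [hb]
  simp

-- ===== VERDICT (by name: the statement is the Claim_ definition above) =====
theorem verts_spec : Claim_equal_verts := by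
  unfold Claim_equal_verts Spec_verts
  intro n m _
  by_cases hm : m ≤ 0
  · rw [verts_eq_listsum, pyRange_one_eq]
    have h0 : (m - 0).toNat = 0 := by omega
    rw [h0]
    simp [verts_alt, hm]
  · have hm : 0 < m := by omega
    rw [verts_eq_listsum, listsum_eq_SN n m hm, verts_alt_closed n m hm]
    obtain ⟨M, rfl⟩ : ∃ M : Nat, m = ↑M := ⟨m.toNat, by omega⟩
    have hM : 0 < M := by exact_mod_cast hm
    rw [Int.toNat_natCast]
    rw [SN_expand, SNP_LL n M hM, SNP_LR n M hM, SNP_RL n M hM, SNP_RR n M hM,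
      SNP_LB n M hM, SNP_RB n M hM, SNP_BL n M hM, SNP_BR n M hM, SNP_BB n M hM,
      W2_eq_W, V_eq_U_add n M hM, wwN_zero]
    have hMM : M - 1 + 1 = M := by omega
    rw [hMM]
    have h48 : (∑ d ∈ Finset.range M, ((M - d : Nat) : Int) * (2 * (n - 1) ^ (d + 1))) * 4
        - (∑ d ∈ Finset.range M, 2 * (n - 1) ^ (d + 1)) * 4
        = ∑ d ∈ Finset.range M, 8 * ((M : Int) - (1 + (d : Int))) * (n - 1) ^ (d + 1) := by
      rw [Finset.sum_mul, Finset.sum_mul, ← Finset.sum_sub_distrib]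
      refine Finset.sum_congr rfl fun d hd => ?_
      have hc : ((M - d : Nat) : Int) = (M : Int) - d := by
        have := Finset.mem_range.mp hd; omega
      rw [hc]; ring
    rw [U_closed, W_closed] at *
    linarith [h48]
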